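-- pv_equiv track=rewrite | github.com/Wang-Yann/LeetCodeMe | python/CrackingTheCodingInterview_6/08_13_pile-box-lcci.py | pileBox
-- ===== SOURCE A (Python) =====
-- import functools
-- from typing import List
--
-- def pileBox(box: List[List[int]]) -> int:
--     @functools.lru_cache(maxsize=None)
--     def dp(w, d, h):
--         inners = [(iw, id, ih) for iw, id, ih in box if iw < w and id < d and ih < h]
--         if not inners:
--             return h
--         return max((dp(iw, id, ih) for iw, id, ih in inners)) + h
--
--     return max(dp(w, d, h) for w, d, h in box)
-- ===== SOURCE B (Python) =====
-- def pileBox(box):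
--     s = sorted(box)
--     dp = []
--     for w, d, h in s:
--         best = None
--         for (jw, jd, jh), v in zip(s, dp):
--             if jw < w and jd < d and jh < h and (best is None or v > best):
--                 best = v
--         dp.append(h if best is None else best + h)
--     return max(dp)
-- ===== Notes on version B (the rewrite author's own statement) =====
-- stated objective: alternative
-- what changed: Replaces the lru_cache-memoized top-down recursion over strictly-smaller box triples by an iterative bottom-up DP: sort a copy of the boxes lexicographically (so any strictly nestable inner box precedes its outer) and fill a dp array in one forward sweep with an inner scan over already-computed entries.
import Mathlib
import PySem

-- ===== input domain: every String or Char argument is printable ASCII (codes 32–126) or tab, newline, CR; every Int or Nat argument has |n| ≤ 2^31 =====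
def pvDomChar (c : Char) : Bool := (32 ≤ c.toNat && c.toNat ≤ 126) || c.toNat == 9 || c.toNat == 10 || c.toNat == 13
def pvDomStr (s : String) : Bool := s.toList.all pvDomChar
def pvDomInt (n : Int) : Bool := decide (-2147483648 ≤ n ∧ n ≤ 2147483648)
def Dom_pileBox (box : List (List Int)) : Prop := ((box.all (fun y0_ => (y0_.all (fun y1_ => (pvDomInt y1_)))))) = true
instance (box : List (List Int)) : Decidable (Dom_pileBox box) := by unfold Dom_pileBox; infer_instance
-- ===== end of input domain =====

-- B replaces A's on-demand memoized recursion by one forward DP sweep over a sorted copy of the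
-- boxes (sorted(box) is a new list; neither version mutates the input).

-- ===== PORT A =====
-- 'iw < w and id < d and ih < h' over an unpacked triple (under Pre_ every element has length 3,
-- so the length guard is exactly 'the unpacking succeeded').
def pvLt3 (a b : List Int) : Bool :=
  a.length == 3 && b.length == 3 &&
    (decide (a.getD 0 0 < b.getD 0 0) && decide (a.getD 1 0 < b.getD 1 0) && decide (a.getD 2 0 < b.getD 2 0))

-- the next three lemmas justify the termination of the port of A's recursion (cited in decreasing_by)
theorem pvLt3_trans {x b t : List Int} (h1 : pvLt3 x b = true) (h2 : pvLt3 b t = true) :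
    pvLt3 x t = true := by
  simp only [pvLt3, Bool.and_eq_true, beq_iff_eq, decide_eq_true_eq] at *; omega

theorem pvLt3_irrefl (b : List Int) : pvLt3 b b = false := by simp [pvLt3]

theorem pvFilterLt (box : List (List Int)) (b t : List Int) (hb : b ∈ box)
    (hbt : pvLt3 b t = true) :
    (box.filter (fun x => pvLt3 x b)).length < (box.filter (fun x => pvLt3 x t)).length := by
  have hsub : List.Sublist (box.filter (fun x => pvLt3 x b)) (box.filter (fun x => pvLt3 x t)) :=
    List.monotone_filter_right box (fun x hx => pvLt3_trans hx hbt)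
  refine lt_of_le_of_ne hsub.length_le (fun heq => ?_)
  have hEq : box.filter (fun x => pvLt3 x b) = box.filter (fun x => pvLt3 x t) :=
    hsub.eq_of_length heq
  have hmem : b ∈ box.filter (fun x => pvLt3 x t) := List.mem_filter.mpr ⟨hb, hbt⟩
  rw [← hEq] at hmem
  have := (List.mem_filter.mp hmem).2
  simp [pvLt3_irrefl] at this

-- A's dp(w,d,h): collect the strictly smaller boxes; if none, return h, else max of dp over them plus h
def pvDpA (box : List (List Int)) (t : List Int) : Int :=
  match hm : box.filter (fun b => pvLt3 b t) with
  | [] => t.getD 2 0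
  | x :: xs =>
      xs.attach.foldl (fun acc b => max acc (pvDpA box b.1)) (pvDpA box x) + t.getD 2 0
termination_by (box.filter (fun b => pvLt3 b t)).length
decreasing_by
  · have hx : b.1 ∈ box.filter (fun bb => pvLt3 bb t) := by
      rw [hm]; exact List.mem_cons_of_mem _ b.2
    obtain ⟨hb2, hlt⟩ := List.mem_filter.mp hx
    exact pvFilterLt box _ t hb2 (by simpa using hlt)
  · have hx : x ∈ box.filter (fun bb => pvLt3 bb t) := by
      rw [hm]; exact List.mem_cons_self
    obtain ⟨hb2, hlt⟩ := List.mem_filter.mp hx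
    exact pvFilterLt box _ t hb2 (by simpa using hlt)

-- max(dp(w,d,h) for w,d,h in box); Python raises ValueError on an empty box (excluded by Pre_)
def pileBox (box : List (List Int)) : Int :=
  match box with
  | [] => 0
  | b :: bs => bs.foldl (fun acc u => max acc (pvDpA box u)) (pvDpA box b)

-- ===== PORT B =====
-- B's inner scan: best dp value over the already-processed strictly smaller boxes (None if none)
def pvBest (s : List (List Int)) (dp : List Int) (t : List Int) : Option Int :=
  (s.zip dp).foldl
    (fun best p =>
      if pvLt3 p.1 t then
        match best with
        | none => some p.2
        | some v => if p.2 > v then some p.2 else some v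
      else best)
    none

-- one iteration of B's outer loop: dp.append(h if best is None else best + h)
def pvStep (s : List (List Int)) (dp : List Int) (t : List Int) : List Int :=
  dp ++ [match pvBest s dp t with
         | none => t.getD 2 0
         | some v => v + t.getD 2 0]

def pileBox_alt (box : List (List Int)) : Int :=
  let s := @PySem.List.sorted (List Int) (List Int) List.instLinearOrder.toLT
             LinearOrder.toDecidableLT box (fun x => x) false
  let dp := s.foldl (pvStep s) []
  match dp with
  | [] => 0
  | x :: xs => xs.foldl max x

-- ===== PRECONDITION & SPEC =====
-- Pre_ excludes exactly the inputs where the Python A raises: an empty list (ValueError from max()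
-- of an empty sequence) and elements that are not 3-element lists (unpacking raises).
def Pre_pileBox (box : List (List Int)) : Prop :=
  box ≠ [] ∧ ∀ b ∈ box, b.length = 3
instance (box : List (List Int)) : Decidable (Pre_pileBox box) := by
  unfold Pre_pileBox; infer_instance

def pvWitness_pileBox : List (List Int) := [[2, 2, 2], [1, 1, 1], [3, 3, 3]]

def Spec_pileBox (box : List (List Int)) (out : Int) : Prop := out = pileBox_alt box
instance (box : List (List Int)) (out : Int) : Decidable (Spec_pileBox box out) := by
  unfold Spec_pileBox; infer_instance

-- ===== CLAIM (what is proved, stated in full; the proofs are below) =====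
def Claim_equal_pileBox : Prop :=
  ∀ (box : List (List Int)), Dom_pileBox box → Pre_pileBox box → Spec_pileBox box (pileBox box)

-- ===== LEMMAS AND PROOFS =====

-- characterisation of A's recursion: dp t = (max of dp over the strictly smaller boxes, or none→0) + h
theorem pvDpA_char (box : List (List Int)) (t : List Int) :
    pvDpA box t
      = ((box.filter (fun b => pvLt3 b t)).map (pvDpA box)).max?.getD 0 + t.getD 2 0 := by
  cases hm : box.filter (fun b => pvLt3 b t) with
  | nil =>
      rw [pvDpA.eq_def, hm]
      simp
  | cons x xs =>
      rw [pvDpA.eq_def, hm]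
      have ha : xs.attach.foldl (fun acc b => max acc (pvDpA box b.1)) (pvDpA box x)
          = xs.foldl (fun acc v => max acc (pvDpA box v)) (pvDpA box x) :=
        List.foldl_attach (l := xs) (f := fun acc v => max acc (pvDpA box v)) (b := pvDpA box x)
      simp only [ha, ← List.foldl_map, List.map_cons, List.max?, Option.getD_some]

-- option-max step describing B's inner scan
def oStep (o : Option Int) (v : Int) : Option Int :=
  match o with
  | none => some v
  | some x => if v > x then some v else some x

theorem oStep_foldl_some (l : List Int) (a : Int) :
    l.foldl oStep (some a) = some (l.foldl max a) := by
  induction l generalizing a with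
  | nil => rfl
  | cons x l ih =>
      have h : oStep (some a) x = some (max a x) := by
        simp only [oStep]; split <;> (congr 1; omega)
      simp only [List.foldl_cons, h, ih]

theorem oStep_foldl (l : List Int) : l.foldl oStep none = l.max? := by
  cases l with
  | nil => rfl
  | cons x l =>
      simp only [List.foldl_cons, List.max?]
      exact oStep_foldl_some l x

-- B's inner scan over (box, dp value) pairs = option-max over dp values of the strictly smaller boxes
theorem pvBest_fold (t : List Int) (g : List Int → Int) (l : List (List Int)) (acc : Option Int) :
    (l.map (fun b => (b, g b))).foldl
        (fun best p =>
          if pvLt3 p.1 t then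
            match best with
            | none => some p.2
            | some v => if p.2 > v then some p.2 else some v
          else best) acc
      = ((l.filter (fun b => pvLt3 b t)).map g).foldl oStep acc := by
  induction l generalizing acc with
  | nil => rfl
  | cons a l ih =>
      simp only [List.map_cons, List.foldl_cons]
      by_cases h : pvLt3 a t = true
      · rw [List.filter_cons_of_pos (by simpa using h)]
        simp only [h, if_true, List.map_cons, List.foldl_cons]
        rw [ih]
        rfl
      · rw [List.filter_cons_of_neg (by simpa using h)]
        simp only [h, if_false]
        exact ih acc

theorem pvBest_eq0 (pre rest : List (List Int)) (t : List Int) (g : List Int → Int) :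
    ((pre ++ rest).zip (pre.map g)).foldl
        (fun best p =>
          if pvLt3 p.1 t then
            match best with
            | none => some p.2
            | some v => if p.2 > v then some p.2 else some v
          else best) none
      = ((pre.filter (fun b => pvLt3 b t)).map g).max? := by
  rw [← List.append_nil (pre.map g), List.zip_append (by simp)]
  simp only [List.zip_nil_right, List.append_nil, ← List.map_prod_left_eq_zip]
  rw [pvBest_fold t g pre none, oStep_foldl]

theorem max?_perm {l1 l2 : List Int} (h : l1.Perm l2) : l1.max? = l2.max? := by
  cases h1 : l1.max? with
  | none =>
      rw [List.max?_eq_none_iff] at h1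
      subst h1
      simp [← List.Perm.nil_eq h]
  | some a =>
      obtain ⟨hmem, hub⟩ := List.max?_eq_some_iff.mp h1
      exact (List.max?_eq_some_iff.mpr ⟨h.mem_iff.mp hmem, fun b hb => hub b (h.mem_iff.mpr hb)⟩).symm

-- strict componentwise smaller implies lexicographically smaller
theorem pvLt3_lt {a b : List Int} (h : pvLt3 a b = true) : a < b := by
  simp only [pvLt3, Bool.and_eq_true, beq_iff_eq, decide_eq_true_eq] at h
  have ha : a.length = 3 := by tauto
  have hb : b.length = 3 := by tauto
  have h0 : a.getD 0 0 < b.getD 0 0 := by tauto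
  obtain ⟨a0, a1, a2, rfl⟩ := List.length_eq_three.mp ha
  obtain ⟨b0, b1, b2, rfl⟩ := List.length_eq_three.mp hb
  exact List.Lex.rel (by simpa using h0)

-- one outer-loop step of B appends exactly A's dp value of the current box
theorem pvStep_eq (box : List (List Int)) (s pre rest : List (List Int)) (t : List Int)
    (hs : s = pre ++ t :: rest) (hPerm : s.Perm box) (hPair : s.Pairwise (· ≤ ·)) :
    pvStep s (pre.map (pvDpA box)) t = (pre ++ [t]).map (pvDpA box) := by
  have hfilter : s.filter (fun b => pvLt3 b t) = pre.filter (fun b => pvLt3 b t) := by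
    subst hs
    rw [List.filter_append]
    have hrest : (t :: rest).filter (fun b => pvLt3 b t) = [] := by
      rw [List.filter_eq_nil_iff]
      intro r hr
      rcases List.mem_cons.mp hr with rfl | hr2
      · simp [pvLt3_irrefl]
      · intro hcon
        have hle : r ≥ t :=
          (List.pairwise_cons.mp (List.pairwise_append.mp hPair).2.1).1 r hr2
        exact absurd (pvLt3_lt (by simpa using hcon)) (not_lt.mpr hle)
    rw [hrest, List.append_nil]
  have hperm2 : ((pre.filter (fun b => pvLt3 b t)).map (pvDpA box)).max?
      = ((box.filter (fun b => pvLt3 b t)).map (pvDpA box)).max? :=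
    max?_perm (List.Perm.map _ (hfilter ▸ hPerm.filter _))
  have hbest : pvBest s (pre.map (pvDpA box)) t
      = ((box.filter (fun b => pvLt3 b t)).map (pvDpA box)).max? := by
    unfold pvBest
    rw [hs, pvBest_eq0, hperm2]
  unfold pvStep
  rw [hbest, List.map_append]
  simp only [List.map_cons, List.map_nil]
  congr 1
  rw [pvDpA_char box t]
  cases hmx : ((box.filter (fun b => pvLt3 b t)).map (pvDpA box)).max? <;> simp [hmx]

-- B's outer fold computes the list of A's dp values of the sorted boxes
theorem pvFold_eq (box : List (List Int)) (s : List (List Int))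
    (hPerm : s.Perm box) (hPair : s.Pairwise (· ≤ ·)) :
    ∀ (rest pre : List (List Int)), s = pre ++ rest →
      rest.foldl (pvStep s) (pre.map (pvDpA box)) = s.map (pvDpA box) := by
  intro rest
  induction rest with
  | nil => intro pre h; simp [h]
  | cons t rest ih =>
      intro pre h
      rw [List.foldl_cons, pvStep_eq box s pre rest t h hPerm hPair]
      exact ih (pre ++ [t]) (by simp [h])

-- ===== VERDICT (by name: the statement is the Claim_ definition above) =====
theorem pileBox_spec : Claim_equal_pileBox := by
  intro box _hdom hpre
  unfold Spec_pileBox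
  obtain ⟨hne, _⟩ := hpre
  have hPerm := @PySem.List.sorted_perm (List Int) (List Int) List.instLinearOrder.toLT
      LinearOrder.toDecidableLT box (fun x => x) false
  have hPair : (@PySem.List.sorted (List Int) (List Int) List.instLinearOrder.toLT
      LinearOrder.toDecidableLT box (fun x => x) false).Pairwise (· ≤ ·) :=
    @PySem.List.sorted_pairwise (List Int) (List Int) _ box (fun x => x)
  set s := @PySem.List.sorted (List Int) (List Int) List.instLinearOrder.toLT
      LinearOrder.toDecidableLT box (fun x => x) false with hsdef
  have hdp : s.foldl (pvStep s) [] = s.map (pvDpA box) := by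
    have := pvFold_eq box s hPerm hPair s [] (by simp)
    simpa using this
  show pileBox box = (match s.foldl (pvStep s) [] with
    | [] => 0
    | x :: xs => xs.foldl max x)
  rw [hdp]
  obtain ⟨b, bs, rfl⟩ := List.exists_cons_of_ne_nil hne
  cases hsv : s with
  | nil => exact absurd (hsv ▸ hPerm) (by simp)
  | cons y ys =>
      simp only [List.map_cons]
      have h1 : (ys.map (pvDpA (b :: bs))).foldl max (pvDpA (b :: bs) y)
          = ((y :: ys).map (pvDpA (b :: bs))).max?.getD 0 := by simp [List.max?]
      have h2 : pileBox (b :: bs)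
          = ((b :: bs).map (pvDpA (b :: bs))).max?.getD 0 := by
        show bs.foldl (fun acc u => max acc (pvDpA (b :: bs) u)) (pvDpA (b :: bs) b)
          = ((b :: bs).map (pvDpA (b :: bs))).max?.getD 0
        rw [← List.foldl_map]
        simp [List.max?]
      rw [h1, h2, max?_perm (List.Perm.map (pvDpA (b :: bs)) ((hsv ▸ hPerm).symm))]
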